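-- pv_equiv track=rewrite | github.com/juliuscueto/project_euler | src/p035_circ_prime.py | is2_5mult
-- ===== SOURCE A (Python) =====
-- def is2_5mult(num):
--     ret = False
--     while num > 0 and not ret:
--         tmp = num % 10
--         num = num // 10
--         ret |= (tmp % 2 == 0)
--         ret |= (tmp % 5 == 0)
--     return ret
-- ===== SOURCE B (Python) =====
-- def is2_5mult(num):
--     return num > 0 and bool(set(str(num)) & set('024568'))
-- ===== Notes on version B (the rewrite author's own statement) =====
-- stated objective: idiomatic
-- what changed: Replaces A's modulus/floor-division digit-extraction while-loop with early exit by building the set of distinct digit characters of str(num) once and testing whether its intersection with the qualifying-digit set {'0','2','4','5','6','8'} is non-empty.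
import Mathlib
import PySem

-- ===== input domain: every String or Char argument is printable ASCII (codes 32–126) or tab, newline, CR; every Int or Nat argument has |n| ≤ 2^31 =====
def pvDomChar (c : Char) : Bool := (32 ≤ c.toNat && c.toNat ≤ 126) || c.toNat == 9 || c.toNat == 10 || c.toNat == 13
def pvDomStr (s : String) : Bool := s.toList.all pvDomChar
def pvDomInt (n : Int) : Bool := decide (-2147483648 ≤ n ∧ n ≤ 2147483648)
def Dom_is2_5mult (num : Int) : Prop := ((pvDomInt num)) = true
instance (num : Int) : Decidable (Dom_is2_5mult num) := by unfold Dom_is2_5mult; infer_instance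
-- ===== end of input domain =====

-- B replaces A's digit-extraction while-loop (with early exit) by building the set of distinct digit
-- characters of str(num) once and intersecting it with the qualifying-digit set (objective: idiomatic).

-- ===== PORT A =====
-- the while-loop of A: state (num, ret), condition 'num > 0 and not ret'
def is2_5multGo (num : Int) (ret : Bool) : Bool :=
  if h : 0 < num ∧ ret = false then
    let tmp := PySem.Int.mod num 10
    is2_5multGo (PySem.Int.floordiv num 10)
      ((ret || (PySem.Int.mod tmp 2 == 0)) || (PySem.Int.mod tmp 5 == 0))
  else ret
termination_by num.toNat
decreasing_by
  have h10 : PySem.Int.floordiv num 10 = num / 10 := by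
    simp [PySem.Int.floordiv, Int.fdiv_eq_ediv]
  rw [h10]
  omega

def is2_5mult (num : Int) : Bool := is2_5multGo num false

-- ===== PORT B =====
-- num > 0 and bool(set(str(num)) & set('024568'))
def is2_5mult_alt (num : Int) : Bool :=
  decide (0 < num) &&
    !(PySem.Set.inter (PySem.Set.ofList (PySem.Int.toStr num).toList)
        (PySem.Set.ofList "024568".toList)).isEmpty

-- ===== PRECONDITION & SPEC =====
def Spec_is2_5mult (num : Int) (out : Bool) : Prop := out = is2_5mult_alt num
instance (num : Int) (out : Bool) : Decidable (Spec_is2_5mult num out) := by unfold Spec_is2_5mult; infer_instance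

-- ===== CLAIM (what is proved, stated in full; the proofs are below) =====
def Claim_equal_is2_5mult : Prop := ∀ (num : Int), Dom_is2_5mult num → Spec_is2_5mult num (is2_5mult num)

-- ===== LEMMAS AND PROOFS =====

-- a digit qualifies when it is even or a multiple of 5
def pvQual (d : Nat) : Bool := (d % 2 == 0) || (d % 5 == 0)

lemma go_true (num : Int) : is2_5multGo num true = true := by
  rw [is2_5multGo]; simp

lemma go_nat (n : Nat) : is2_5multGo (n : Int) false = (Nat.digits 10 n).any pvQual := by
  induction n using Nat.strong_induction_on with
  | _ n ih =>
    rcases Nat.eq_zero_or_pos n with h0 | h0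
    · subst h0; rw [is2_5multGo]; simp
    · rw [is2_5multGo]
      have hpos : (0 : Int) < (n : Int) := by exact_mod_cast h0
      rw [dif_pos ⟨hpos, rfl⟩]
      have hm : PySem.Int.mod (n : Int) 10 = ((n % 10 : Nat) : Int) :=
        PySem.Int.mod_natCast n 10
      have hd : PySem.Int.floordiv (n : Int) 10 = ((n / 10 : Nat) : Int) :=
        PySem.Int.floordiv_natCast n 10
      have h2 : PySem.Int.mod ((n % 10 : Nat) : Int) 2 = ((n % 10 % 2 : Nat) : Int) :=
        PySem.Int.mod_natCast (n % 10) 2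
      have h5 : PySem.Int.mod ((n % 10 : Nat) : Int) 5 = ((n % 10 % 5 : Nat) : Int) :=
        PySem.Int.mod_natCast (n % 10) 5
      simp only [hm, hd, h2, h5, Bool.false_or]
      rw [Nat.digits_def' (by norm_num : 1 < 10) h0, List.any_cons]
      have hret : (((n % 10 % 2 : Nat) : Int) == 0 || ((n % 10 % 5 : Nat) : Int) == 0)
          = pvQual (n % 10) := by
        have e2 : (((n % 10 % 2 : Nat) : Int) == 0) = (n % 10 % 2 == 0) := by
          simp; omega
        have e5 : (((n % 10 % 5 : Nat) : Int) == 0) = (n % 10 % 5 == 0) := by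
          simp; omega
        rw [e2, e5]; rfl
      rw [hret]
      cases hq : pvQual (n % 10) with
      | true => simp [go_true]
      | false => simpa using ih (n / 10) (Nat.div_lt_self h0 (by norm_num))

lemma toDigitsCore_eq (fuel : Nat) : ∀ (n : Nat) (acc : List Char), 0 < n → n < fuel →
    Nat.toDigitsCore 10 fuel n acc = ((Nat.digits 10 n).map Nat.digitChar).reverse ++ acc := by
  induction fuel with
  | zero => intro n acc h0 h; omega
  | succ f ih =>
    intro n acc h0 h
    simp only [Nat.toDigitsCore]
    rw [Nat.digits_def' (by norm_num : 1 < 10) h0]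
    by_cases hz : n / 10 = 0
    · simp [hz]
    · have h0' : 0 < n / 10 := Nat.pos_of_ne_zero hz
      have hf : n / 10 < f := by
        have := Nat.div_lt_self h0 (by norm_num : 1 < 10); omega
      simp only [if_neg hz, ih (n / 10) _ h0' hf]
      simp

-- nonemptiness of the set intersection ↔ some character of the list lies in the small set
lemma inter_nonempty_iff_any (l : List Char) :
    (!(PySem.Set.inter (PySem.Set.ofList l) (PySem.Set.ofList "024568".toList)).isEmpty)
      = l.any (fun c => decide (c ∈ "024568".toList)) := by
  rcases h : l.any (fun c => decide (c ∈ "024568".toList)) with _ | _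
  · simp only [List.any_eq_false, decide_eq_true_eq] at h
    have : PySem.Set.inter (PySem.Set.ofList l) (PySem.Set.ofList "024568".toList) = [] := by
      rw [List.eq_nil_iff_forall_not_mem]
      intro c hc
      rw [PySem.Set.mem_inter] at hc
      exact h c (by simpa [PySem.Set.mem_ofList] using hc.1) (by simpa [PySem.Set.mem_ofList] using hc.2)
    rw [this]
    rfl
  · simp only [List.any_eq_true, decide_eq_true_eq] at h
    obtain ⟨c, hcl, hcs⟩ := h
    have : c ∈ PySem.Set.inter (PySem.Set.ofList l) (PySem.Set.ofList "024568".toList) := by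
      rw [PySem.Set.mem_inter]
      exact ⟨by simpa [PySem.Set.mem_ofList] using hcl, by simpa [PySem.Set.mem_ofList] using hcs⟩
    have hne := List.ne_nil_of_mem this
    rw [List.isEmpty_eq_false_iff.mpr hne]
    rfl

lemma any_digits_char (l : List Nat) (h : ∀ d ∈ l, d < 10) :
    l.any (fun d => decide (Nat.digitChar d ∈ "024568".toList)) = l.any pvQual := by
  induction l with
  | nil => rfl
  | cons d t ih =>
    have hd : d < 10 := h d (List.mem_cons_self ..)
    have hq : decide (Nat.digitChar d ∈ "024568".toList) = pvQual d := by
      interval_cases d <;> decide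
    simp only [List.any_cons, hq, ih (fun x hx => h x (List.mem_cons_of_mem _ hx))]

-- ===== VERDICT (by name: the statement is the Claim_ definition above) =====
theorem is2_5mult_spec : Claim_equal_is2_5mult := by
  intro num _
  unfold Spec_is2_5mult is2_5mult is2_5mult_alt
  by_cases h : 0 < num
  · lift num to Nat using le_of_lt h with n
    have hn : 0 < n := by exact_mod_cast h
    rw [go_nat, inter_nonempty_iff_any]
    have htc : (PySem.Int.toStr (n : Int)).toList = Nat.toDigits 10 n := by
      simp [PySem.Int.toStr, PySem.Int.toChars, not_lt.mpr (Int.natCast_nonneg n)]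
    rw [htc, decide_eq_true h, Bool.true_and,
      Nat.toDigits, toDigitsCore_eq (n + 1) n [] hn (by omega)]
    simp only [List.any_append, List.any_reverse, List.any_map, Function.comp_def, List.any_nil,
      Bool.or_false]
    rw [any_digits_char _ (fun d hd => Nat.digits_lt_base (by norm_num) hd)]
  · rw [is2_5multGo]
    simp [h]
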